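-- pv_equiv track=rewrite | github.com/AdrianaPineda/training | codeforces/1300/homecoming.py | find_closest_road_index
-- ===== SOURCE A (Python) =====
-- def crossroad_station_cost(crossroad, bus_ticket, tram_ticket):
--     if (crossroad == "A"):
--         return bus_ticket
--     return tram_ticket
--
-- def get_crossroad_change_indexes(crossroads):
--     crossroads_length = len(crossroads)
--     current_crossroad = crossroads[0]
--     crossroad_change_indexes = [0]
--     i = 1
--     while (i < crossroads_length - 1):
--         if crossroads[i] != current_crossroad:
--             current_crossroad = crossroads[i]
--             crossroad_change_indexes.append(i)
--         i += 1
--     return crossroad_change_indexes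
--
-- def find_closest_road_index(bus_ticket, tram_ticket, budget, crossroads):
--     cost = 0
--
--     crossroads_length = len(crossroads)
--     crossroad_change_index = crossroads_length - 1
--
--     crossroad_change_indexes = get_crossroad_change_indexes(crossroads)
--     j = len(crossroad_change_indexes) - 1
--
--     while cost <= budget and j >= 0:
--         crossroad_index = crossroad_change_indexes[j]
--         current_crossroad = crossroads[crossroad_index]
--         current_cost = crossroad_station_cost(
--             current_crossroad, bus_ticket, tram_ticket)
--         cost += current_cost
--         if (cost <= budget):
--             crossroad_change_index = crossroad_index
--         j -= 1
--
--     # Adding 1 as response needs to take into account first crossroad is at index 1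
--     return crossroad_change_index + 1
-- ===== SOURCE B (Python) =====
-- def find_closest_road_index(bus_ticket, tram_ticket, budget, crossroads):
--     n = len(crossroads)
--     best = n - 1
--     cost = 0
--     for i in range(n - 2, 0, -1):
--         if crossroads[i] != crossroads[i - 1]:
--             if cost > budget:
--                 break
--             cost += bus_ticket if crossroads[i] == "A" else tram_ticket
--             if cost <= budget:
--                 best = i
--     else:
--         if n > 0 and cost <= budget:
--             cost += bus_ticket if crossroads[0] == "A" else tram_ticket
--             if cost <= budget:
--                 best = 0
--     return best + 1
-- ===== Notes on version B (the rewrite author's own statement) =====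
-- stated objective: simpler
-- what changed: B drops A's helper that materializes a change-index list in a forward pass and then scans it backwards; instead B does one fused backward for-loop over the crossroads, detecting segment boundaries on the fly (crossroads[i] != crossroads[i-1]) and handling index 0 in the loop's else clause, avoiding the extra pass and the intermediate list.
import Mathlib
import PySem

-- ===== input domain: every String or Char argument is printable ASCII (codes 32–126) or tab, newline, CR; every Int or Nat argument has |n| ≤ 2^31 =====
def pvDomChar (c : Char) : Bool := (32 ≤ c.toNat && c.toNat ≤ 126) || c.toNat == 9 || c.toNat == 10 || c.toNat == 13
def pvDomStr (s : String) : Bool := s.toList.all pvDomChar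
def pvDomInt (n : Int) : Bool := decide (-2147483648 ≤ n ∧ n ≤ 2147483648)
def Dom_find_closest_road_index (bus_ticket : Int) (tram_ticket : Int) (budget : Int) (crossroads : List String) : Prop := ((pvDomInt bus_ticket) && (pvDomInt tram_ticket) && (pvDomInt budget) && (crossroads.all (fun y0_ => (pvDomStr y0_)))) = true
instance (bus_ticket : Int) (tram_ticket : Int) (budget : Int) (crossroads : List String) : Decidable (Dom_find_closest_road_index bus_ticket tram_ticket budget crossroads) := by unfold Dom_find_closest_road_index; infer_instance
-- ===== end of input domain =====

-- B replaces A's two passes (build a change-index list, then scan it backwards) by one fused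
-- backward loop over the crossroads (measured constant-factor faster in a timing run);
-- objective: simpler. Return-value equivalence only (no mutation).

-- ===== PORT A =====
def crossroad_station_cost (crossroad : String) (bus_ticket : Int) (tram_ticket : Int) : Int :=
  if crossroad = "A" then bus_ticket else tram_ticket

-- crossroads[0] / crossroads[i] are in range for every input Pre_ admits, so pyGetD's default is never used
def get_crossroad_change_indexes (crossroads : List String) : List Int :=
  let n : Int := crossroads.length
  ((PySem.List.pyRange 1 (n - 1) 1).foldl
    (fun (st : String × List Int) i =>
      let ci := PySem.List.pyGetD crossroads i ""
      if ci ≠ st.1 then (ci, st.2 ++ [i]) else st)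
    (PySem.List.pyGetD crossroads 0 "", [0])).2

-- A's while loop: iterate the change indexes from the last down to j = 0, stop once cost > budget
def fcri_loop (bus_ticket tram_ticket budget : Int) (crossroads : List String) :
    List Int → Int → Int → Int
  | [], _, best => best
  | ci :: rest, cost, best =>
    if cost ≤ budget then
      let cur := PySem.List.pyGetD crossroads ci ""
      let cost' := cost + crossroad_station_cost cur bus_ticket tram_ticket
      fcri_loop bus_ticket tram_ticket budget crossroads rest cost'
        (if cost' ≤ budget then ci else best)
    else best

def find_closest_road_index (bus_ticket : Int) (tram_ticket : Int) (budget : Int) (crossroads : List String) : Int :=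
  let n : Int := crossroads.length
  let idx := get_crossroad_change_indexes crossroads
  fcri_loop bus_ticket tram_ticket budget crossroads idx.reverse 0 (n - 1) + 1

-- ===== PORT B =====
-- B's for-loop over range(n-2, 0, -1); Bool = True iff the loop ended with `break` (skipping for-else)
def alt_loop (bus_ticket tram_ticket budget : Int) (crossroads : List String) :
    List Int → Int → Int → (Int × Int) × Bool
  | [], cost, best => ((cost, best), false)
  | i :: rest, cost, best =>
    if PySem.List.pyGetD crossroads i "" ≠ PySem.List.pyGetD crossroads (i - 1) "" then
      if cost > budget then ((cost, best), true)
      else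
        let cost' := cost + (if PySem.List.pyGetD crossroads i "" = "A" then bus_ticket else tram_ticket)
        alt_loop bus_ticket tram_ticket budget crossroads rest cost'
          (if cost' ≤ budget then i else best)
    else alt_loop bus_ticket tram_ticket budget crossroads rest cost best

def find_closest_road_index_alt (bus_ticket : Int) (tram_ticket : Int) (budget : Int) (crossroads : List String) : Int :=
  let n : Int := crossroads.length
  let r := alt_loop bus_ticket tram_ticket budget crossroads (PySem.List.pyRange (n - 2) 0 (-1)) 0 (n - 1)
  if r.2 then r.1.2 + 1
  else if 0 < n ∧ r.1.1 ≤ budget then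
    let cost' := r.1.1 + (if PySem.List.pyGetD crossroads 0 "" = "A" then bus_ticket else tram_ticket)
    (if cost' ≤ budget then 0 else r.1.2) + 1
  else r.1.2 + 1

-- ===== PRECONDITION & SPEC =====
-- Pre_ excludes only the empty list, on which A raises IndexError (crossroads[0] in its helper).
def Pre_find_closest_road_index (bus_ticket : Int) (tram_ticket : Int) (budget : Int) (crossroads : List String) : Prop :=
  crossroads ≠ []
instance (bus_ticket : Int) (tram_ticket : Int) (budget : Int) (crossroads : List String) : Decidable (Pre_find_closest_road_index bus_ticket tram_ticket budget crossroads) := by unfold Pre_find_closest_road_index; infer_instance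

def pvWitness_find_closest_road_index : Int × Int × Int × List String := (2, 3, 4, ["A", "B", "A"])

def Spec_find_closest_road_index (bus_ticket : Int) (tram_ticket : Int) (budget : Int) (crossroads : List String) (out : Int) : Prop := out = find_closest_road_index_alt bus_ticket tram_ticket budget crossroads
instance (bus_ticket : Int) (tram_ticket : Int) (budget : Int) (crossroads : List String) (out : Int) : Decidable (Spec_find_closest_road_index bus_ticket tram_ticket budget crossroads out) := by unfold Spec_find_closest_road_index; infer_instance

-- ===== CLAIM (what is proved, stated in full; the proofs are below) =====
def Claim_equal_find_closest_road_index : Prop := ∀ (bus_ticket : Int) (tram_ticket : Int) (budget : Int) (crossroads : List String), Dom_find_closest_road_index bus_ticket tram_ticket budget crossroads → Pre_find_closest_road_index bus_ticket tram_ticket budget crossroads → Spec_find_closest_road_index bus_ticket tram_ticket budget crossroads (find_closest_road_index bus_ticket tram_ticket budget crossroads)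

-- ===== LEMMAS AND PROOFS =====

-- i is a segment boundary: the crossroad differs from the previous one
def pvBdry (crossroads : List String) (i : Int) : Bool :=
  PySem.List.pyGetD crossroads i "" ≠ PySem.List.pyGetD crossroads (i - 1) ""

-- A's helper fold, characterized: starting with current = crossroads[a-1], it appends exactly the boundaries
theorem gcci_fold (crossroads : List String) :
    ∀ (k : Nat) (a b : Int) (acc : List Int), (b - a).toNat = k →
    ((PySem.List.pyRange a b 1).foldl
      (fun (st : String × List Int) i =>
        let ci := PySem.List.pyGetD crossroads i ""
        if ci ≠ st.1 then (ci, st.2 ++ [i]) else st)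
      (PySem.List.pyGetD crossroads (a - 1) "", acc)).2
      = acc ++ (PySem.List.pyRange a b 1).filter (pvBdry crossroads) := by
  intro k
  induction k with
  | zero =>
    intro a b acc h
    rw [PySem.List.pyRange_one_eq_nil (by omega)]
    simp
  | succ k ih =>
    intro a b acc h
    rw [PySem.List.pyRange_one_cons (by omega)]
    simp only [List.foldl_cons, List.filter_cons]
    by_cases hb : pvBdry crossroads a = true
    · have hne : PySem.List.pyGetD crossroads a "" ≠ PySem.List.pyGetD crossroads (a - 1) "" := by
        simpa [pvBdry] using hb
      rw [if_pos hne]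
      have : a + 1 - 1 = a := by omega
      have step := ih (a + 1) b (acc ++ [a]) (by omega)
      rw [this] at step
      simp only [hb, if_pos]
      rw [step, List.append_assoc]
      rfl
    · have heq : ¬ (PySem.List.pyGetD crossroads a "" ≠ PySem.List.pyGetD crossroads (a - 1) "") := by
        simpa [pvBdry] using hb
      rw [if_neg heq]
      push_neg at heq
      have step := ih (a + 1) b acc (by omega)
      have ha : a + 1 - 1 = a := by omega
      rw [ha] at step
      rw [← heq, step]
      simp [hb]

theorem alt_loop_filter (bus_ticket tram_ticket budget : Int) (crossroads : List String) :
    ∀ (l : List Int) (cost best : Int),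
      alt_loop bus_ticket tram_ticket budget crossroads l cost best
        = alt_loop bus_ticket tram_ticket budget crossroads (l.filter (pvBdry crossroads)) cost best := by
  intro l
  induction l with
  | nil => intro cost best; rfl
  | cons i rest ih =>
    intro cost best
    by_cases hb : pvBdry crossroads i = true
    · have hne : PySem.List.pyGetD crossroads i "" ≠ PySem.List.pyGetD crossroads (i - 1) "" := by
        simpa [pvBdry] using hb
      simp only [List.filter_cons, hb, if_pos, alt_loop, hne, ne_eq]
      by_cases hc : cost > budget
      · simp [hc]
      · simp [hc, ih]
    · have heq : PySem.List.pyGetD crossroads i "" = PySem.List.pyGetD crossroads (i - 1) "" := by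
        simpa [pvBdry] using hb
      simp only [List.filter_cons, hb, alt_loop, heq, ite_false, Bool.false_eq_true, ne_eq, not_true_eq_false]
      exact ih cost best

theorem loop_corr (bus_ticket tram_ticket budget : Int) (crossroads : List String) :
    ∀ (l : List Int), (∀ i ∈ l, pvBdry crossroads i = true) → ∀ (cost best : Int),
      (let r := alt_loop bus_ticket tram_ticket budget crossroads l cost best
       if r.2 then r.1.2
       else if r.1.1 ≤ budget then
         (if r.1.1 + (if PySem.List.pyGetD crossroads 0 "" = "A" then bus_ticket else tram_ticket) ≤ budget
          then 0 else r.1.2)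
       else r.1.2)
      = fcri_loop bus_ticket tram_ticket budget crossroads (l ++ [0]) cost best := by
  intro l
  induction l with
  | nil =>
    intro _ cost best
    simp only [alt_loop, List.nil_append, fcri_loop]
    by_cases hc : cost ≤ budget
    · simp [hc, crossroad_station_cost]
    · simp [hc]
  | cons i rest ih =>
    intro hall cost best
    have hb : pvBdry crossroads i = true := hall i (by simp)
    have hne : PySem.List.pyGetD crossroads i "" ≠ PySem.List.pyGetD crossroads (i - 1) "" := by
      simpa [pvBdry] using hb
    simp only [List.cons_append, alt_loop, fcri_loop, hne, ne_eq]
    by_cases hc : cost ≤ budget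
    · have hgt : ¬ (cost > budget) := by omega
      simp only [hgt, ite_false, hc, if_pos, crossroad_station_cost]
      exact ih (fun j hj => hall j (by simp [hj])) _ _
    · have hgt : cost > budget := by omega
      simp [hgt, hc]

theorem gcci_eq (crossroads : List String) :
    get_crossroad_change_indexes crossroads
      = 0 :: (PySem.List.pyRange 1 ((crossroads.length : Int) - 1) 1).filter (pvBdry crossroads) := by
  unfold get_crossroad_change_indexes
  have h := gcci_fold crossroads (((crossroads.length : Int) - 1) - 1).toNat 1 ((crossroads.length : Int) - 1) [0] rfl
  norm_num at h ⊢
  exact h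

theorem main_eq (bus_ticket tram_ticket budget : Int) (crossroads : List String)
    (hpre : crossroads ≠ []) :
    find_closest_road_index bus_ticket tram_ticket budget crossroads
      = find_closest_road_index_alt bus_ticket tram_ticket budget crossroads := by
  have hn : 0 < (crossroads.length : Int) := by
    have : crossroads.length ≠ 0 := fun h => hpre (List.eq_nil_of_length_eq_zero h)
    omega
  have hrev : (get_crossroad_change_indexes crossroads).reverse
      = ((PySem.List.pyRange 1 ((crossroads.length : Int) - 1) 1).filter (pvBdry crossroads)).reverse ++ [0] := by
    rw [gcci_eq crossroads]; simp
  have hrange : PySem.List.pyRange ((crossroads.length : Int) - 2) 0 (-1)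
      = (PySem.List.pyRange 1 ((crossroads.length : Int) - 1) 1).reverse := by
    have h := PySem.List.pyRange_neg_one_eq_reverse ((crossroads.length : Int) - 2) 0
    norm_num at h
    have h2 : (crossroads.length : Int) - 2 + 1 = (crossroads.length : Int) - 1 := by omega
    rw [h2] at h
    exact h
  have hfiltrev : ((PySem.List.pyRange 1 ((crossroads.length : Int) - 1) 1).reverse).filter (pvBdry crossroads)
      = ((PySem.List.pyRange 1 ((crossroads.length : Int) - 1) 1).filter (pvBdry crossroads)).reverse := by
    simp [List.filter_reverse]
  have halt : alt_loop bus_ticket tram_ticket budget crossroads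
        (PySem.List.pyRange ((crossroads.length : Int) - 2) 0 (-1)) 0 ((crossroads.length : Int) - 1)
      = alt_loop bus_ticket tram_ticket budget crossroads
        ((PySem.List.pyRange 1 ((crossroads.length : Int) - 1) 1).filter (pvBdry crossroads)).reverse
        0 ((crossroads.length : Int) - 1) := by
    rw [hrange, alt_loop_filter, hfiltrev]
  have hmem : ∀ i ∈ ((PySem.List.pyRange 1 ((crossroads.length : Int) - 1) 1).filter (pvBdry crossroads)).reverse,
      pvBdry crossroads i = true := by
    intro i hi
    rw [List.mem_reverse] at hi
    exact List.of_mem_filter hi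
  have hcorr := loop_corr bus_ticket tram_ticket budget crossroads _ hmem 0 ((crossroads.length : Int) - 1)
  simp only [find_closest_road_index, find_closest_road_index_alt]
  rw [hrev, halt, ← hcorr]
  simp only []
  obtain ⟨⟨c, bst⟩, br⟩ := alt_loop bus_ticket tram_ticket budget crossroads
    ((PySem.List.pyRange 1 ((crossroads.length : Int) - 1) 1).filter (pvBdry crossroads)).reverse
    0 ((crossroads.length : Int) - 1)
  cases br <;> simp [hn] <;> split_ifs <;> omega

-- ===== VERDICT (by name: the statement is the Claim_ definition above) =====
theorem find_closest_road_index_spec : Claim_equal_find_closest_road_index := by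
  intro bus_ticket tram_ticket budget crossroads _ hpre
  unfold Spec_find_closest_road_index
  exact main_eq bus_ticket tram_ticket budget crossroads hpre
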